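-- pv_equiv track=rewrite | github.com/A-G0D/taylorcs | Brainrot.py | repl
-- ===== SOURCE A (Python) =====
-- def shift(s: str, o: int) -> str:
--     res: str = ""
--     for char in s:
--         if not char.isalpha() or not char.islower():
--             return s
--         else:
--             res += chr((ord(char) - ord('a') + o) % 26 + ord('a'))
--     return res
--
-- def repl(sl: list[str]) -> list[str]:
--     res = []
--     for word in sl:
--         w: bool = False
--         for dist in range(1, 26):
--             shifted: str = shift(word, dist)
--             if shifted in ["skibidi", "rizz", "sigma", "gyatt"]:
--                 res.append(shifted)
--                 w = True
--                 break
--         if not w: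
--             res.append(word)
--     return res
-- ===== SOURCE B (Python) =====
-- TARGETS = ["skibidi", "rizz", "sigma", "gyatt"]
--
--
-- def shift(s: str, o: int) -> str:
--     res: str = ""
--     for char in s:
--         if not char.isalpha() or not char.islower():
--             return s
--         else:
--             res += chr((ord(char) - ord('a') + o) % 26 + ord('a'))
--     return res
--
--
-- def _build_table() -> dict:
--     # For each offset o (ascending, so the smallest offset wins) and each
--     # target, the unique source word that o shifts onto the target.
--     table = {}
--     for o in range(1, 26):
--         for t in TARGETS:
--             src = shift(t, (26 - o) % 26)
--             if src not in table:
--                 table[src] = t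
--     return table
--
--
-- _TABLE = _build_table()
--
--
-- def repl(sl: list) -> list:
--     return [_TABLE.get(w, w) for w in sl]
-- ===== Notes on version B (the rewrite author's own statement) =====
-- stated objective: faster
-- what changed: Instead of trying all 25 Caesar offsets per word, B precomputes once a dict from every possible source word to its slang target (offsets ascending so the smallest offset wins, offset 0 excluded as in A) and replaces each word by a single dict lookup.
import Mathlib
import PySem

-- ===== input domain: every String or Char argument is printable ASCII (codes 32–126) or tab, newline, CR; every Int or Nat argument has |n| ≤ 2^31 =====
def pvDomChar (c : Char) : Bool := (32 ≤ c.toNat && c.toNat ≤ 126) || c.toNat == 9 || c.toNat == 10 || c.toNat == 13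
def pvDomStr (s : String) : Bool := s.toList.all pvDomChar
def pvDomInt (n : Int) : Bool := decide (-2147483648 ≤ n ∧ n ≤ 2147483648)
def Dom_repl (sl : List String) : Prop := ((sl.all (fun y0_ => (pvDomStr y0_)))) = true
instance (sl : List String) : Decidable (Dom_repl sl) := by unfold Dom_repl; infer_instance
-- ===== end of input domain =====

-- B replaces the per-word scan over all 25 shift offsets by a table, built once,
-- from candidate source words to their slang target (objective: faster, O(n) per call
-- after O(1) table setup, vs O(25·|word|) per word).


-- ===== PORT A =====
-- shift is the shared helper of Source A and Source B (Source B defines the identical function);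
-- char.isalpha()/char.islower() are PySem.Chars predicates (exact on the ASCII domain).
def shiftGo (s : List Char) (o : Int) : List Char → List Char → List Char
  | [], res => res
  | c :: cs, res =>
    if !(PySem.Chars.isalpha c && PySem.Chars.islower c) then s
    else shiftGo s o cs
      (res ++ [Char.ofNat ((PySem.Int.mod ((c.toNat : Int) - ('a'.toNat : Int) + o) 26).toNat + ('a'.toNat))])

def shift (s : String) (o : Int) : String := String.ofList (shiftGo s.toList o s.toList [])

def targetsL : List String := ["skibidi", "rizz", "sigma", "gyatt"]

-- the inner 'for dist in range(1, 26): … break' loop: some shifted on the first hit, none if no break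
def innerA (word : String) : List Int → Option String
  | [] => none
  | d :: ds =>
    let shifted := shift word d
    if shifted ∈ targetsL then some shifted else innerA word ds

def repl (sl : List String) : List String :=
  sl.foldl (fun res word =>
    res ++ [match innerA word (PySem.List.pyRange 1 26 1) with
            | some t => t
            | none => word]) []

-- ===== PORT B =====
-- build the source→target table: offsets ascending, insert only if the key is absent
def srcIns (o : Int) (tb : PySem.Dict String String) (t : String) : PySem.Dict String String :=
  let src := shift t (PySem.Int.mod (26 - o) 26)
  if tb.contains src then tb else tb.insert src t

def blockOff (tb : PySem.Dict String String) (o : Int) : PySem.Dict String String :=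
  targetsL.foldl (srcIns o) tb

def tableB : PySem.Dict String String :=
  (PySem.List.pyRange 1 26 1).foldl blockOff PySem.Dict.empty

def repl_alt (sl : List String) : List String := sl.map (fun w => tableB.getD w w)

-- ===== PRECONDITION & SPEC =====
def Spec_repl (sl : List String) (out : List String) : Prop := out = repl_alt sl
instance (sl : List String) (out : List String) : Decidable (Spec_repl sl out) := by unfold Spec_repl; infer_instance

-- ===== CLAIM (what is proved, stated in full; the proofs are below) =====
def Claim_equal_repl : Prop := ∀ (sl : List String), Dom_repl sl → Spec_repl sl (repl sl)

-- ===== LEMMAS AND PROOFS =====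

-- the per-char shift, and 'all chars are lowercase letters'
def scChar (o : Int) (c : Char) : Char :=
  Char.ofNat ((PySem.Int.mod ((c.toNat : Int) - ('a'.toNat : Int) + o) 26).toNat + ('a'.toNat))

def goodChar (c : Char) : Bool := PySem.Chars.isalpha c && PySem.Chars.islower c

theorem goodChar_iff (c : Char) : goodChar c = true ↔ 97 ≤ c.toNat ∧ c.toNat ≤ 122 := by
  unfold goodChar
  simp only [PySem.Chars.isalpha, PySem.Chars.islower, Bool.and_eq_true, Bool.or_eq_true,
    decide_eq_true_eq]
  constructor
  · rintro ⟨_, h1, h2⟩; exact ⟨h1, h2⟩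
  · rintro ⟨h1, h2⟩; exact ⟨Or.inr ⟨h1, h2⟩, h1, h2⟩

theorem toNat_scChar (o : Int) (c : Char) :
    (scChar o c).toNat = (PySem.Int.mod ((c.toNat : Int) - 97 + o) 26).toNat + 97 := by
  unfold scChar
  have hple : (0 : Int) < 26 := by omega
  have h1 := PySem.Int.mod_nonneg ((c.toNat : Int) - 97 + o) hple
  have h2 := PySem.Int.mod_lt ((c.toNat : Int) - 97 + o) hple
  rw [Char.toNat_ofNat]
  have : ('a'.toNat) = 97 := rfl
  rw [this]
  simp only [Nat.isValidChar]
  have : (PySem.Int.mod ((c.toNat : Int) - 97 + o) 26).toNat + 97 < 55296 := by omega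
  simp [this]; omega

theorem goodChar_scChar (o : Int) (c : Char) : goodChar (scChar o c) = true := by
  rw [goodChar_iff, toNat_scChar]
  have hple : (0 : Int) < 26 := by omega
  have h1 := PySem.Int.mod_nonneg ((c.toNat : Int) - 97 + o) hple
  have h2 := PySem.Int.mod_lt ((c.toNat : Int) - 97 + o) hple
  omega

-- the round trip on good characters, for offsets 1..25
theorem scChar_inv (o : Int) (c : Char) (ho : 1 ≤ o) (ho' : o ≤ 25)
    (hc : goodChar c = true) : scChar (26 - o) (scChar o c) = c := by
  rw [goodChar_iff] at hc
  have hple : (0 : Int) < 26 := by omega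
  have ht : (scChar (26 - o) (scChar o c)).toNat = c.toNat := by
    simp only [toNat_scChar]
    have h1 := PySem.Int.mod_nonneg ((c.toNat : Int) - 97 + o) hple
    have h2 := PySem.Int.mod_lt ((c.toNat : Int) - 97 + o) hple
    set a : Int := PySem.Int.mod ((c.toNat : Int) - 97 + o) 26 with ha
    have hcast : ((a.toNat + 97 : Nat) : Int) = a + 97 := by
      push_cast [Int.toNat_of_nonneg h1]; ring
    rw [hcast, PySem.Int.mod_eq_emod_of_pos hple]
    have ea : a = (c.toNat : Int) - 97 + o - 26 * (((c.toNat : Int) - 97 + o) / 26) := by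
      rw [ha, PySem.Int.mod_eq_emod_of_pos hple, Int.emod_def]
    have e3 : a + 97 - 97 + (26 - o)
        = ((c.toNat : Int) - 97) + 26 * (1 - (((c.toNat : Int) - 97 + o) / 26)) := by omega
    rw [e3, Int.add_mul_emod_self_left]
    have : ((c.toNat : Int) - 97) % 26 = (c.toNat : Int) - 97 :=
      Int.emod_eq_of_lt (by omega) (by omega)
    omega
  calc scChar (26 - o) (scChar o c) = Char.ofNat (scChar (26 - o) (scChar o c)).toNat :=
        (Char.ofNat_toNat _).symm
    _ = Char.ofNat c.toNat := by rw [ht]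
    _ = c := Char.ofNat_toNat c

-- shift on all-good character lists is the character-wise map
theorem shiftGo_good (o : Int) (s : List Char) :
    ∀ (cs res : List Char), (∀ c ∈ cs, goodChar c = true) →
      shiftGo s o cs res = res ++ cs.map (scChar o) := by
  intro cs
  induction cs with
  | nil => intro res _; simp [shiftGo]
  | cons c cs ih =>
    intro res hg
    have hc : goodChar c = true := hg c (by simp)
    unfold shiftGo
    rw [show (PySem.Chars.isalpha c && PySem.Chars.islower c) = goodChar c from rfl, hc]
    simp only [Bool.not_true, Bool.false_eq_true, if_false]
    rw [ih _ (fun x hx => hg x (by simp [hx]))]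
    simp [scChar, List.append_assoc]

-- shift with a bad character returns the original list
theorem shiftGo_bad (o : Int) (s : List Char) :
    ∀ (cs res : List Char), (∃ c ∈ cs, ¬ goodChar c = true) → shiftGo s o cs res = s := by
  intro cs
  induction cs with
  | nil => rintro res ⟨c, hc, _⟩; simp at hc
  | cons c cs ih =>
    rintro res ⟨x, hx, hbad⟩
    unfold shiftGo
    by_cases hc : goodChar c = true
    · rw [show (PySem.Chars.isalpha c && PySem.Chars.islower c) = goodChar c from rfl, hc]
      simp only [Bool.not_true, Bool.false_eq_true, if_false]
      apply ih
      rcases List.mem_cons.mp hx with h | h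
      · exact absurd (h ▸ hc) hbad
      · exact ⟨x, h, hbad⟩
    · have hcf : (PySem.Chars.isalpha c && PySem.Chars.islower c) = false := by
        revert hc; unfold goodChar
        cases (PySem.Chars.isalpha c && PySem.Chars.islower c) <;> simp
      rw [hcf]; simp

def allGood (w : String) : Bool := w.toList.all goodChar

theorem shift_toList_good (w : String) (o : Int) (h : allGood w = true) :
    (shift w o).toList = w.toList.map (scChar o) := by
  unfold shift
  rw [shiftGo_good o w.toList w.toList [] (by simpa [allGood, List.all_eq_true] using h)]
  simp

theorem shift_bad (w : String) (o : Int) (h : ¬ allGood w = true) : shift w o = w := by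
  unfold shift
  have : ∃ c ∈ w.toList, ¬ goodChar c = true := by
    simpa [allGood, List.all_eq_true] using h
  rw [shiftGo_bad o w.toList w.toList [] this]
  simp

theorem shift_roundtrip (w : String) (o : Int) (ho : 1 ≤ o) (ho' : o ≤ 25)
    (h : allGood w = true) : shift (shift w o) (26 - o) = w := by
  have h1 : allGood (shift w o) = true := by
    unfold allGood
    rw [shift_toList_good w o h]
    simp only [List.all_map, List.all_eq_true, Function.comp]
    intro c _; exact goodChar_scChar o c
  have h2 : (shift (shift w o) (26 - o)).toList = w.toList := by
    rw [shift_toList_good _ _ h1, shift_toList_good w o h, List.map_map]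
    conv_rhs => rw [← List.map_id w.toList]
    apply List.map_congr_left
    intro c hc
    exact scChar_inv o c ho ho' (List.all_eq_true.mp h c hc)
  calc shift (shift w o) (26 - o) = String.ofList (shift (shift w o) (26 - o)).toList := by simp
    _ = String.ofList w.toList := by rw [h2]
    _ = w := by simp

-- each target is all lowercase letters
theorem targets_allGood : ∀ t ∈ targetsL, allGood t = true := by decide

-- concrete facts over the 25 offsets and 4 targets
theorem key_shift (d : Int) (hd : d ∈ PySem.List.pyRange 1 26 1) (t : String) (ht : t ∈ targetsL) :
    shift (shift t (PySem.Int.mod (26 - d) 26)) d = t := by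
  revert t ht; revert d hd; decide

theorem mod_26_sub (d : Int) (hd : d ∈ PySem.List.pyRange 1 26 1) :
    PySem.Int.mod (26 - d) 26 = 26 - d := by
  revert d hd; decide

-- if shifting w by d hits a target, w is exactly that target un-shifted
theorem shift_eq_target (w t : String) (d : Int) (hd : d ∈ PySem.List.pyRange 1 26 1)
    (ht : t ∈ targetsL) (h : shift w d = t) : w = shift t (PySem.Int.mod (26 - d) 26) := by
  have hrange := (PySem.List.mem_pyRange_one).mp hd
  by_cases hg : allGood w = true
  · have := shift_roundtrip w d (by omega) (by omega) hg
    rw [mod_26_sub d hd, ← h, this]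
  · rw [shift_bad w d hg] at h
    exact absurd (h ▸ targets_allGood t ht) hg

-- the key of (d, t) matches w exactly when shifting w by d yields t
theorem key_iff (w t : String) (d : Int) (hd : d ∈ PySem.List.pyRange 1 26 1)
    (ht : t ∈ targetsL) : shift t (PySem.Int.mod (26 - d) 26) = w ↔ shift w d = t := by
  constructor
  · intro h; rw [← h]; exact key_shift d hd t ht
  · intro h; exact (shift_eq_target w t d hd ht h).symm

-- one insert-if-absent step, seen through get?
theorem get?_ins_step (tb : PySem.Dict String String) (k v w : String) :
    ((if tb.contains k then tb else tb.insert k v).get? w)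
      = (tb.get? w).or (if k = w then some v else none) := by
  by_cases hc : tb.contains k = true
  · rw [if_pos hc]
    by_cases hk : k = w
    · subst hk
      rcases ho : tb.get? k with _ | v'
      · rw [PySem.Dict.contains_eq_isSome_get?, ho] at hc; simp at hc
      · simp [ho]
    · simp [hk]
  · rw [if_neg hc]
    have hn : tb.get? k = none := by
      rcases ho : tb.get? k with _ | v'
      · rfl
      · rw [PySem.Dict.contains_eq_isSome_get?, ho] at hc; simp at hc
    rw [PySem.Dict.get?_insert]
    by_cases hk : w = k
    · subst hk; simp [hn]
    · simp [hk, Ne.symm hk]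

-- one offset block of the table build, seen through get?
theorem get?_blockOff (d : Int) (hd : d ∈ PySem.List.pyRange 1 26 1)
    (tb : PySem.Dict String String) (w : String) :
    (blockOff tb d).get? w
      = (tb.get? w).or (if shift w d ∈ targetsL then some (shift w d) else none) := by
  have k1 := key_iff w "skibidi" d hd (by decide)
  have k2 := key_iff w "rizz" d hd (by decide)
  have k3 := key_iff w "sigma" d hd (by decide)
  have k4 := key_iff w "gyatt" d hd (by decide)
  unfold blockOff targetsL
  simp only [List.foldl_cons, List.foldl_nil, srcIns]
  rw [get?_ins_step, get?_ins_step, get?_ins_step, get?_ins_step]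
  rw [Option.or_assoc, Option.or_assoc, Option.or_assoc]
  congr 1
  simp only [k1, k2, k3, k4]
  simp only [targetsL, List.mem_cons, List.not_mem_nil, or_false]
  by_cases h1 : shift w d = "skibidi"
  · simp [h1]
  · by_cases h2 : shift w d = "rizz"
    · simp [h1, h2]
    · by_cases h3 : shift w d = "sigma"
      · simp [h1, h2, h3]
      · by_cases h4 : shift w d = "gyatt"
        · simp [h1, h4]
        · simp [h1, h2, h3, h4]

-- the built table answers exactly what A's inner loop answers
theorem get?_build (ds : List Int) :
    ∀ (tb : PySem.Dict String String) (w : String),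
      (∀ d ∈ ds, d ∈ PySem.List.pyRange 1 26 1) →
      (ds.foldl blockOff tb).get? w = (tb.get? w).or (innerA w ds) := by
  induction ds with
  | nil => intro tb w _; simp [innerA]
  | cons d ds ih =>
    intro tb w hds
    simp only [List.foldl_cons]
    rw [ih _ w (fun x hx => hds x (by simp [hx]))]
    rw [get?_blockOff d (hds d (by simp)) tb w, Option.or_assoc]
    congr 1
    have he : innerA w (d :: ds) = if shift w d ∈ targetsL then some (shift w d) else innerA w ds := rfl
    rw [he]
    by_cases h : shift w d ∈ targetsL <;> simp [h]

theorem perWord (w : String) :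
    tableB.getD w w
      = (match innerA w (PySem.List.pyRange 1 26 1) with
         | some t => t
         | none => w) := by
  rw [PySem.Dict.getD_eq_get?_getD]
  unfold tableB
  rw [get?_build _ _ _ (fun d hd => hd)]
  rw [PySem.Dict.get?_empty]
  rcases innerA w (PySem.List.pyRange 1 26 1) with _ | t <;> simp

-- ===== VERDICT (by name: the statement is the Claim_ definition above) =====
theorem repl_spec : Claim_equal_repl := by
  intro sl _
  unfold Spec_repl repl repl_alt
  rw [PySem.List.foldl_append_singleton_eq_map]
  apply List.map_congr_left
  intro w _
  exact (perWord w).symm
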